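-- pv_equiv track=rewrite | github.com/noelbriones/PanCan-Spectrum | src/admin_models.py | set_labels
-- ===== SOURCE A (Python) =====
-- def set_labels(list):
--     labels = []
--     i = 0
--
--     # Ensure two classes are produced for the classifier
--     while i < len(list) / 2:
--         if i % 10 == 0:
--             labels.append(1)
--         else:
--             labels.append(0)
--         i += 1
--     j = 0
--     while j < len(list) / 2:
--         if j % 10 == 0:
--             labels.append(0)
--         else:
--             labels.append(1)
--         j += 1
--     return labels
-- ===== SOURCE B (Python) =====
-- def set_labels(list):
--     m = -(-len(list) // 2)          # iteration count of 'while i < len(list)/2'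
--     reps = -(-m // 10)              # enough 10-element blocks to cover m
--     return (([1] + [0] * 9) * reps)[:m] + (([0] + [1] * 9) * reps)[:m]
-- ===== Notes on version B (the rewrite author's own statement) =====
-- stated objective: alternative
-- what changed: B replaces A's per-index while-loops with modulo tests by block tiling: it repeats the literal 10-element period blocks [1,0,...,0] and [0,1,...,1] enough times and slices each to the half-length m, so no index arithmetic or modulo is performed at all.
import Mathlib
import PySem

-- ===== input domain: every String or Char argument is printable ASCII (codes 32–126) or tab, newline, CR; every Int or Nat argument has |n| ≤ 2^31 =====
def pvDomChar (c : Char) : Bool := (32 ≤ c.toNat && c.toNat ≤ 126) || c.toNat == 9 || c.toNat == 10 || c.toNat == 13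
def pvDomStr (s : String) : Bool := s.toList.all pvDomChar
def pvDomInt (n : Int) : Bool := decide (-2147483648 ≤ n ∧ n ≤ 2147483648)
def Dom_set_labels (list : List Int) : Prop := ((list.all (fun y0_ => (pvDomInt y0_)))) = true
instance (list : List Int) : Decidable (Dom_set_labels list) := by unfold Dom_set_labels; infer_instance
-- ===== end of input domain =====

-- B builds the result by tiling the literal 10-element period blocks and slicing to the half length, instead of A's per-index modulo loops; return values proved equal.


-- ===== PORT A =====
-- first while loop: while i < len(list)/2 (i.e. 2*i < n): append 1 if i%10==0 else 0
def set_labels_loop1 (n i : Nat) : List Int :=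
  if 2 * i < n then (if i % 10 = 0 then (1 : Int) else 0) :: set_labels_loop1 n (i + 1) else []
termination_by n - 2 * i
decreasing_by omega

-- second while loop: while j < len(list)/2: append 0 if j%10==0 else 1
def set_labels_loop2 (n j : Nat) : List Int :=
  if 2 * j < n then (if j % 10 = 0 then (0 : Int) else 1) :: set_labels_loop2 n (j + 1) else []
termination_by n - 2 * j
decreasing_by omega

def set_labels (list : List Int) : List Int :=
  set_labels_loop1 list.length 0 ++ set_labels_loop2 list.length 0

-- ===== PORT B =====
-- block tiling: repeat the 10-element period blocks and slice to m (Python's lst*reps and [:m])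
def set_labels_alt (list : List Int) : List Int :=
  let m := (list.length + 1) / 2
  let reps := (m + 9) / 10
  (List.replicate reps ([1, 0, 0, 0, 0, 0, 0, 0, 0, 0] : List Int)).flatten.take m ++
    (List.replicate reps ([0, 1, 1, 1, 1, 1, 1, 1, 1, 1] : List Int)).flatten.take m

-- ===== PRECONDITION & SPEC =====
def Spec_set_labels (list : List Int) (out : List Int) : Prop := out = set_labels_alt list
instance (list : List Int) (out : List Int) : Decidable (Spec_set_labels list out) := by unfold Spec_set_labels; infer_instance

-- ===== CLAIM (what is proved, stated in full; the proofs are below) =====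
def Claim_equal_set_labels : Prop := ∀ (list : List Int), Dom_set_labels list → Spec_set_labels list (set_labels list)

-- ===== LEMMAS AND PROOFS =====
theorem loop1_eq (n : Nat) : ∀ (k i : Nat), (n + 1) / 2 = i + k →
    set_labels_loop1 n i = (List.range' i k).map (fun j => if j % 10 = 0 then (1 : Int) else 0) := by
  intro k
  induction k with
  | zero => intro i h; rw [set_labels_loop1]; simp; omega
  | succ k ih =>
      intro i h
      rw [set_labels_loop1]
      have : 2 * i < n := by omega
      simp only [this, if_true, List.range'_succ, List.map_cons]
      rw [ih (i + 1) (by omega)]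

theorem loop2_eq (n : Nat) : ∀ (k j : Nat), (n + 1) / 2 = j + k →
    set_labels_loop2 n j = (List.range' j k).map (fun i => if i % 10 = 0 then (0 : Int) else 1) := by
  intro k
  induction k with
  | zero => intro j h; rw [set_labels_loop2]; simp; omega
  | succ k ih =>
      intro j h
      rw [set_labels_loop2]
      have : 2 * j < n := by omega
      simp only [this, if_true, List.range'_succ, List.map_cons]
      rw [ih (j + 1) (by omega)]

-- tiling a 10-periodic map's fundamental block r times gives the map over range (10*r)
theorem flatten_replicate_period (f : Nat → Int) (hper : ∀ i, f (10 + i) = f i) (r : Nat) :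
    (List.replicate r ((List.range 10).map f)).flatten = (List.range (10 * r)).map f := by
  induction r with
  | zero => simp
  | succ r ih =>
      rw [List.replicate_succ, List.flatten_cons, ih]
      have h10 : 10 * (r + 1) = 10 + 10 * r := by ring
      rw [h10, List.range_add, List.map_append, List.map_map]
      congr 1
      apply List.map_congr_left
      intro i _
      exact (hper i).symm

-- ===== VERDICT (by name: the statement is the Claim_ definition above) =====
theorem set_labels_spec : Claim_equal_set_labels := by
  intro list _
  unfold Spec_set_labels set_labels set_labels_alt
  set n := list.length
  set m := (n + 1) / 2 with hm
  set reps := (m + 9) / 10 with hreps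
  have hcov : m ≤ 10 * reps := by omega
  rw [loop1_eq n m 0 (by omega), loop2_eq n m 0 (by omega)]
  dsimp only
  have hb1 : ([1, 0, 0, 0, 0, 0, 0, 0, 0, 0] : List Int)
      = (List.range 10).map (fun j => if j % 10 = 0 then (1 : Int) else 0) := by decide
  have hb2 : ([0, 1, 1, 1, 1, 1, 1, 1, 1, 1] : List Int)
      = (List.range 10).map (fun j => if j % 10 = 0 then (0 : Int) else 1) := by decide
  rw [hb1, hb2,
      flatten_replicate_period _ (fun i => by simp [Nat.add_comm 10 i]) reps,
      flatten_replicate_period _ (fun i => by simp [Nat.add_comm 10 i]) reps,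
      ← List.map_take, ← List.map_take, List.take_range,
      Nat.min_eq_left hcov]
  simp [List.range'_eq_map_range]
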